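-- pv_equiv track=rewrite | github.com/sc0116/Algorithm | Programmers/level 2/기능개발.py | solution
-- ===== SOURCE A (Python) =====
-- from collections import deque
--
-- def solution(progresses, speeds):
--     answer = []
--     p = deque(progresses)
--     s = deque(speeds)
--     while p:
--         count = 0
--         for i in range(len(p)):
--             p[i] += s[i]
--         while p[0] >= 100:
--             p.popleft()
--             s.popleft()
--             count += 1
--             if not p:
--                 break
--         if count > 0:
--             answer.append(count)
--     return answer
-- ===== SOURCE B (Python) =====
-- def solution(progresses, speeds):
--     answer = []
--     cur = None
--     count = 0
--     for pr, sp in zip(progresses, speeds):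
--         d = max(1, -((pr - 100) // sp))
--         if cur is None or d > cur:
--             if count > 0:
--                 answer.append(count)
--             cur = d
--             count = 1
--         else:
--             count += 1
--     if count > 0:
--         answer.append(count)
--     return answer
-- ===== Notes on version B (the rewrite author's own statement) =====
-- stated objective: faster
-- what changed: B replaces A's day-by-day simulation of the whole deque (increment every task each day, pop completed heads) with a closed-form completion day per task via ceiling division and a single pass grouping consecutive tasks whose day does not exceed the running group's day; intended as faster (O(n) vs O(n*D)) - a timing run saw A time out at n=16 where B returned, so no clean ratio was measured.
-- outside the precondition, e.g. on solution([100], [0]): A returns [1], B raises ZeroDivisionError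
import Mathlib
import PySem

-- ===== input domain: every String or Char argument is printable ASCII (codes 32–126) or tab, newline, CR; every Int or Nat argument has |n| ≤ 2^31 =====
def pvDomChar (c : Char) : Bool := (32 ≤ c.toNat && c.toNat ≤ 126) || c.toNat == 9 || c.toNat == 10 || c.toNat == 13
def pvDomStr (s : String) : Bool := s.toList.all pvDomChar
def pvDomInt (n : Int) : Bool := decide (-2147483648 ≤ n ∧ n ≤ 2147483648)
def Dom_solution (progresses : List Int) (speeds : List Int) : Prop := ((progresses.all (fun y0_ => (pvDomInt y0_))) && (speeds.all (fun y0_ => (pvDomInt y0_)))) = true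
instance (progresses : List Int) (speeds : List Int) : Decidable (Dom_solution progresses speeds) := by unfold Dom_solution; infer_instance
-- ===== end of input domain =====

-- B replaces A's day-by-day deque simulation with per-task completion days (ceiling
-- division) grouped in one pass; intended as faster (O(n) vs O(n*D)); the timing
-- run saw A time out where B returned, so no ratio was measured.

-- ===== PORT A =====
-- inner 'while p[0] >= 100' loop: pop completed heads, counting them
def popA : List Int → List Int → Int → List Int × List Int × Int
  | [], s, c => ([], s, c)                       -- 'if not p: break'
  | h :: t, s, c =>
    if h ≥ 100 then popA t (s.drop 1) (c + 1) else (h :: t, s, c)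

-- fuel for the outer 'while p' loop: a totality guard only (under Pre_solution the
-- loop stops long before the fuel runs out; A itself loops forever on some inputs
-- outside Pre_solution)
def fuelA (p : List Int) : Nat := p.foldl (fun a x => a + ((101 - x).toNat + 1)) 1

def loopA : Nat → List Int → List Int → List Int → List Int
  | 0, _, _, ans => ans
  | fuel + 1, p, s, ans =>
    if p.isEmpty then ans
    else
      -- p1 = the progresses after one more day: p[i] += s[i]
      loopA fuel (popA (List.zipWith (· + ·) p s) s 0).1
        (popA (List.zipWith (· + ·) p s) s 0).2.1
        (if (popA (List.zipWith (· + ·) p s) s 0).2.2 > 0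
         then ans ++ [(popA (List.zipWith (· + ·) p s) s 0).2.2] else ans)

def solution (progresses : List Int) (speeds : List Int) : List Int :=
  loopA (fuelA progresses) progresses speeds []

-- ===== PORT B =====
-- d = max(1, -((pr - 100) // sp)) : the day task (pr, sp) completes
def dayOf (pr sp : Int) : Int := max 1 (-(PySem.Int.floordiv (pr - 100) sp))

def loopB : List (Int × Int) → Option Int → Int → List Int → List Int
  | [], _, count, ans => if count > 0 then ans ++ [count] else ans
  | (pr, sp) :: rest, cur, count, ans =>
    let d := dayOf pr sp
    match cur with
    | none => loopB rest (some d) 1 (if count > 0 then ans ++ [count] else ans)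
    | some c =>
      if d > c then loopB rest (some d) 1 (ans ++ [count])
      else loopB rest (some c) (count + 1) ans

def solution_alt (progresses : List Int) (speeds : List Int) : List Int :=
  loopB (progresses.zip speeds) none 0 []

-- ===== PRECONDITION & SPEC =====
-- Pre_ excludes inputs where some of the speeds actually used is ≤ 0 (A then loops
-- forever on almost all of them, and B divides by the speed) and inputs where
-- speeds is shorter than progresses (A raises IndexError).
def Pre_solution (progresses : List Int) (speeds : List Int) : Prop :=
  progresses.length ≤ speeds.length ∧ ∀ x ∈ speeds.take progresses.length, 0 < x
instance (progresses : List Int) (speeds : List Int) : Decidable (Pre_solution progresses speeds) := by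
  unfold Pre_solution; infer_instance

def pvWitness_solution : List Int × List Int := ([30, 95, 93], [5, 10, 1])

def Spec_solution (progresses : List Int) (speeds : List Int) (out : List Int) : Prop := out = solution_alt progresses speeds
instance (progresses : List Int) (speeds : List Int) (out : List Int) : Decidable (Spec_solution progresses speeds out) := by unfold Spec_solution; infer_instance

-- ===== CLAIM (what is proved, stated in full; the proofs are below) =====
def Claim_equal_solution : Prop := ∀ (progresses : List Int) (speeds : List Int), Dom_solution progresses speeds → Pre_solution progresses speeds → Spec_solution progresses speeds (solution progresses speeds)

-- ===== LEMMAS AND PROOFS =====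

-- progress values after t days
def shift (t : Int) : List Int → List Int → List Int :=
  List.zipWith (fun pr sp => pr + t * sp)

lemma one_le_dayOf (pr sp : Int) : 1 ≤ dayOf pr sp := le_max_left _ _

-- task (pr, sp) is complete after t days iff its completion day is ≤ t
lemma complete_iff (pr sp t : Int) (hsp : 0 < sp) (ht : 1 ≤ t) :
    100 ≤ pr + t * sp ↔ dayOf pr sp ≤ t := by
  have h2 := PySem.Int.le_floordiv_iff_mul_le (a := pr - 100) (b := sp) (q := -t) hsp
  rw [neg_mul] at h2
  unfold dayOf
  rw [max_le_iff]
  constructor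
  · intro h; exact ⟨ht, by omega⟩
  · intro h; omega

lemma dayOf_le_bound (pr sp : Int) (hsp : 0 < sp) :
    dayOf pr sp ≤ ((101 - pr).toNat : Int) + 1 := by
  set B : Int := ((101 - pr).toNat : Int) + 1 with hB
  have hB1 : 1 ≤ B := by omega
  have h2 := PySem.Int.le_floordiv_iff_mul_le (a := pr - 100) (b := sp) (q := -B) hsp
  rw [neg_mul] at h2
  have hmul : B * 1 ≤ B * sp := by
    apply mul_le_mul_of_nonneg_left (by omega) (by omega)
  unfold dayOf
  rw [max_le_iff]
  refine ⟨hB1, ?_⟩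
  have : -(B * sp) ≤ pr - 100 := by
    have : B ≤ B * sp := by omega
    omega
  omega

lemma le_foldl_fuel (xs : List Int) (a : Nat) :
    a ≤ xs.foldl (fun a x => a + ((101 - x).toNat + 1)) a := by
  induction xs generalizing a with
  | nil => simp
  | cons x xs ih =>
    simp only [List.foldl_cons]
    exact le_trans (Nat.le_add_right _ _) (ih _)

lemma days_le_fuel (ps ss : List Int) (a : Nat)
    (hpos : ∀ x ∈ ss.take ps.length, 0 < x) :
    ∀ d ∈ List.zipWith dayOf ps ss, d ≤ (ps.foldl (fun a x => a + ((101 - x).toNat + 1)) a : Nat) := by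
  induction ps generalizing ss a with
  | nil => simp
  | cons x xs ih =>
    cases ss with
    | nil => simp
    | cons y ys =>
      intro d hd
      simp only [List.zipWith_cons_cons, List.mem_cons] at hd
      have hy : 0 < y := hpos y (by simp)
      rcases hd with h | h
      · subst h
        have h1 := dayOf_le_bound x y hy
        have h2 := le_foldl_fuel xs (a + ((101 - x).toNat + 1))
        simp only [List.foldl_cons]
        omega
      · have := ih ys (a + ((101 - x).toNat + 1))
          (by intro z hz; exact hpos z (by simpa using List.mem_cons_of_mem _ hz)) d h
        simpa using this

lemma shift_zero (ps ss : List Int) (h : ps.length ≤ ss.length) : shift 0 ps ss = ps := by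
  induction ps generalizing ss with
  | nil => rfl
  | cons x xs ih =>
    cases ss with
    | nil => simp at h
    | cons y ys =>
      simp only [shift, List.zipWith_cons_cons, List.cons.injEq] at *
      refine ⟨by ring, ih ys (by simpa using h)⟩

lemma shift_succ (t : Int) (ps ss : List Int) :
    List.zipWith (· + ·) (shift t ps ss) ss = shift (t + 1) ps ss := by
  induction ps generalizing ss with
  | nil => rfl
  | cons x xs ih =>
    cases ss with
    | nil => rfl
    | cons y ys =>
      simp only [shift, List.zipWith_cons_cons, List.cons.injEq] at *
      refine ⟨by ring, ih ys⟩

lemma popA_count_le (p s : List Int) (c : Int) : c ≤ (popA p s c).2.2 := by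
  induction p generalizing s c with
  | nil => simp [popA]
  | cons h t ih =>
    simp only [popA]
    split
    · exact le_trans (by omega) (ih _ _)
    · simp

-- the simulation from time t on, with the batch at hand still popping, equals B's
-- grouping with the current group's day = t and count tasks already in the group
lemma aux_of_main (fuel : Nat)
    (hmain : ∀ (ps ss : List Int) (t : Int) (ans : List Int),
      ps.length ≤ ss.length →
      (∀ x ∈ ss.take ps.length, 0 < x) →
      0 ≤ t →
      (∀ d0, (List.zipWith dayOf ps ss).head? = some d0 → t < d0) →
      (∀ d ∈ List.zipWith dayOf ps ss, d ≤ t + fuel) →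
      loopA fuel (shift t ps ss) ss ans = loopB (ps.zip ss) none 0 ans) :
    ∀ (ps ss : List Int) (t count : Int) (ans : List Int),
      ps.length ≤ ss.length →
      (∀ x ∈ ss.take ps.length, 0 < x) →
      1 ≤ t → 1 ≤ count →
      (∀ d ∈ List.zipWith dayOf ps ss, d ≤ t + fuel) →
      loopA fuel (popA (shift t ps ss) ss count).1 (popA (shift t ps ss) ss count).2.1
        (ans ++ [(popA (shift t ps ss) ss count).2.2]) = loopB (ps.zip ss) (some t) count ans := by
  intro ps
  induction ps with
  | nil =>
    intro ss t count ans _ _ _ hc _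
    simp only [shift, List.zipWith_nil_left, popA, List.zip_nil_left, loopB]
    rw [if_pos (by omega)]
    cases fuel <;> simp [loopA]
  | cons x xs ih =>
    intro ss t count ans hlen hpos ht hc hfb
    cases ss with
    | nil => simp at hlen
    | cons y ys =>
      have hy : 0 < y := hpos y (by simp)
      have hd0 : dayOf x y ∈ List.zipWith dayOf (x :: xs) (y :: ys) := by simp
      by_cases hdt : dayOf x y ≤ t
      · -- head already complete at time t: A pops it, B extends the group
        have hge : 100 ≤ x + t * y := (complete_iff x y t hy ht).2 hdt
        have hstep : popA (shift t (x :: xs) (y :: ys)) (y :: ys) count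
            = popA (shift t xs ys) ys (count + 1) := by
          simp only [shift, List.zipWith_cons_cons, popA, if_pos (by omega : x + t * y ≥ 100)]
          rfl
        rw [hstep]
        have := ih ys t (count + 1) ans (by simpa using hlen)
          (by intro z hz; exact hpos z (by simpa using List.mem_cons_of_mem _ hz))
          ht (by omega)
          (by intro d hd; exact hfb d (by simpa using List.mem_cons_of_mem _ hd))
        rw [this]
        simp only [List.zip_cons_cons, loopB]
        rw [if_neg (by omega : ¬ dayOf x y > t)]
      · -- head not yet complete: the batch is over; restart a fresh group
        have hlt : ¬ (100 ≤ x + t * y) := fun h => hdt ((complete_iff x y t hy ht).1 h)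
        have hstop : popA (shift t (x :: xs) (y :: ys)) (y :: ys) count
            = (shift t (x :: xs) (y :: ys), y :: ys, count) := by
          simp only [shift, List.zipWith_cons_cons, popA]
          rw [if_neg (by omega : ¬ x + t * y ≥ 100)]
        rw [hstop]
        have hm := hmain (x :: xs) (y :: ys) t (ans ++ [count]) hlen hpos (by omega)
          (by intro d0 h0; simp at h0; omega) hfb
        rw [hm]
        simp only [List.zip_cons_cons, loopB]
        rw [if_neg (by omega : ¬ (0:Int) > 0), if_pos (by omega : dayOf x y > t)]

lemma one_le_mem_days (ps ss : List Int) : ∀ d ∈ List.zipWith dayOf ps ss, 1 ≤ d := by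
  induction ps generalizing ss with
  | nil => simp
  | cons x xs ih =>
    cases ss with
    | nil => simp
    | cons y ys =>
      intro d hd
      simp only [List.zipWith_cons_cons, List.mem_cons] at hd
      rcases hd with h | h
      · subst h; exact one_le_dayOf x y
      · exact ih ys d h

-- A's simulation started at time t (head not yet complete) equals B's grouping
lemma main_all (fuel : Nat) :
    ∀ (ps ss : List Int) (t : Int) (ans : List Int),
      ps.length ≤ ss.length →
      (∀ x ∈ ss.take ps.length, 0 < x) →
      0 ≤ t →
      (∀ d0, (List.zipWith dayOf ps ss).head? = some d0 → t < d0) →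
      (∀ d ∈ List.zipWith dayOf ps ss, d ≤ t + fuel) →
      loopA fuel (shift t ps ss) ss ans = loopB (ps.zip ss) none 0 ans := by
  induction fuel with
  | zero =>
    intro ps ss t ans hlen hpos ht hhead hfb
    cases ps with
    | nil => simp [loopA, loopB]
    | cons x xs =>
      cases ss with
      | nil => simp at hlen
      | cons y ys =>
        exfalso
        have h1 := hhead (dayOf x y) (by simp)
        have h2 := hfb (dayOf x y) (by simp)
        omega
  | succ f ihf =>
    intro ps ss t ans hlen hpos ht hhead hfb
    cases ps with
    | nil => simp [shift, loopA, loopB]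
    | cons x xs =>
      cases ss with
      | nil => simp at hlen
      | cons y ys =>
        have hy : 0 < y := hpos y (by simp)
        have hhd := hhead (dayOf x y) (by simp)
        have hne : ¬ (shift t (x :: xs) (y :: ys)).isEmpty := by
          simp [shift]
        simp only [loopA]
        rw [if_neg hne, shift_succ]
        by_cases hpop : dayOf x y ≤ t + 1
        · -- batch day reached: t + 1 = dayOf x y; head pops, a group starts
          have heq : dayOf x y = t + 1 := by omega
          have hge : 100 ≤ x + (t + 1) * y := (complete_iff x y (t + 1) hy (by omega)).2 hpop
          have hstep : popA (shift (t + 1) (x :: xs) (y :: ys)) (y :: ys) 0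
              = popA (shift (t + 1) xs ys) ys 1 := by
            simp only [shift, List.zipWith_cons_cons, popA, if_pos (by omega : x + (t+1) * y ≥ 100)]
            rfl
          rw [hstep]
          have hcnt : (0:Int) < (popA (shift (t + 1) xs ys) ys 1).2.2 :=
            lt_of_lt_of_le (by omega) (popA_count_le _ _ _)
          rw [if_pos (by omega)]
          have := aux_of_main f (ihf) xs ys (t + 1) 1 ans (by simpa using hlen)
            (by intro z hz; exact hpos z (by simpa using List.mem_cons_of_mem _ hz))
            (by omega) (by omega)
            (by intro d hd
                have := hfb d (by simpa using List.mem_cons_of_mem _ hd)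
                omega)
          rw [this]
          simp only [List.zip_cons_cons, loopB]
          rw [if_neg (by omega : ¬ (0:Int) > 0), heq]
        · -- nothing completes on day t + 1: advance time
          have hlt : ¬ (100 ≤ x + (t + 1) * y) :=
            fun h => hpop ((complete_iff x y (t + 1) hy (by omega)).1 h)
          have hstop : popA (shift (t + 1) (x :: xs) (y :: ys)) (y :: ys) 0
              = (shift (t + 1) (x :: xs) (y :: ys), y :: ys, 0) := by
            simp only [shift, List.zipWith_cons_cons, popA]
            rw [if_neg (by omega : ¬ x + (t+1) * y ≥ 100)]
          rw [hstop]
          rw [if_neg (by omega : ¬ (0:Int) > 0)]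
          exact ihf (x :: xs) (y :: ys) (t + 1) ans hlen hpos (by omega)
            (by intro d0 h0; simp at h0; omega)
            (by intro d hd; have := hfb d hd; omega)

-- ===== VERDICT (by name: the statement is the Claim_ definition above) =====
theorem solution_spec : Claim_equal_solution := by
  intro progresses speeds _ hpre
  obtain ⟨hlen, hpos⟩ := hpre
  unfold Spec_solution solution solution_alt
  have hm := main_all (fuelA progresses) progresses speeds 0 []
    hlen hpos le_rfl
    (by intro d0 h0'
        have hd : d0 ∈ List.zipWith dayOf progresses speeds := by
          cases hzz : List.zipWith dayOf progresses speeds with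
          | nil => rw [hzz] at h0'; simp at h0'
          | cons a l =>
            rw [hzz] at h0'; simp at h0'; simp [h0']
        have := one_le_mem_days progresses speeds d0 hd
        omega)
    (by intro d hd
        have := days_le_fuel progresses speeds 1 hpos d hd
        simpa [fuelA] using this)
  rw [shift_zero _ _ hlen] at hm
  exact hm
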